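-- pv_equiv track=rewrite | github.com/lkrvtsk/- | Лабораторная №2/Лаб_2_задание_3.py | count_non_zero_columns
-- ===== SOURCE A (Python) =====
-- def is_matrix_rectangular(matrix):
--     return all(len(row) == len(matrix[0]) for row in matrix)
--
-- def count_non_zero_columns(matrix):
--     if not matrix:
--         return 0
--     if not is_matrix_rectangular(matrix):
--         return -1  #не прямоугольная, возвращаем -1
--
--     num_rows = len(matrix)
--     num_cols = len(matrix[0])
--     non_zero_cols = 0
--
--     for col in range(num_cols):
--         has_zero = False
--         for row in range(num_rows):
--             if matrix[row][col] == 0: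
--                 has_zero = True
--                 break
--         if not has_zero:
--             non_zero_cols += 1
--
--     return non_zero_cols
-- ===== SOURCE B (Python) =====
-- def is_matrix_rectangular(matrix):
--     return all(len(row) == len(matrix[0]) for row in matrix)
--
-- def count_non_zero_columns(matrix):
--     if not matrix:
--         return 0
--     if not is_matrix_rectangular(matrix):
--         return -1  # не прямоугольная, возвращаем -1
--
--     num_cols = len(matrix[0])
--     zero_cols = set()
--     for row in matrix:
--         for c, v in enumerate(row):
--             if v == 0:
--                 zero_cols.add(c)
--     return num_cols - len(zero_cols)
-- ===== Notes on version B (the rewrite author's own statement) =====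
-- stated objective: alternative
-- what changed: Replaces the column-outer/row-inner scan with early break by a single row-major pass that accumulates the set of column indices containing a zero, returning num_cols minus the size of that set.
import Mathlib
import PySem

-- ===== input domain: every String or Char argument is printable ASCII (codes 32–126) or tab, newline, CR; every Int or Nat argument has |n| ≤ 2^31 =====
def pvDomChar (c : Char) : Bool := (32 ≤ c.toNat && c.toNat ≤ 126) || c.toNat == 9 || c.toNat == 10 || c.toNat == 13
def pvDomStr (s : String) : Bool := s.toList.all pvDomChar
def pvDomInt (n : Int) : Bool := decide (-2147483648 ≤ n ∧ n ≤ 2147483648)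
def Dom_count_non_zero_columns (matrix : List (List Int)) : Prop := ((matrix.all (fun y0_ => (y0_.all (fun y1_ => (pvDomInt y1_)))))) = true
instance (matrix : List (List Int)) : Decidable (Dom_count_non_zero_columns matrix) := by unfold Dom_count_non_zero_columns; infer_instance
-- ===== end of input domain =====

-- B replaces A's column-outer scan with early break by one row-major pass collecting the
-- set of zero-containing column indices (alternative decomposition, same asymptotic cost).

-- ===== PORT A =====
def is_matrix_rectangular (matrix : List (List Int)) : Bool :=
  matrix.all (fun row => row.length == (PySem.List.pyGetD matrix 0 []).length)

-- inner 'for row in range(num_rows): if matrix[row][col] == 0: has_zero = True; break'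
def colScanA (matrix : List (List Int)) (col : Int) : List Int → Bool
  | [] => false
  | r :: rs =>
    if PySem.List.pyGetD (PySem.List.pyGetD matrix r []) col 1 == 0 then true
    else colScanA matrix col rs

def count_non_zero_columns (matrix : List (List Int)) : Int :=
  if matrix.isEmpty then 0
  else if !is_matrix_rectangular matrix then -1
  else
    let num_rows : Int := matrix.length
    let num_cols : Int := (PySem.List.pyGetD matrix 0 []).length
    (PySem.List.pyRange 0 num_cols 1).foldl
      (fun acc col =>
        let has_zero := colScanA matrix col (PySem.List.pyRange 0 num_rows 1)
        if !has_zero then acc + 1 else acc) 0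

-- ===== PORT B =====
def is_matrix_rectangular_alt (matrix : List (List Int)) : Bool :=
  matrix.all (fun row => row.length == (PySem.List.pyGetD matrix 0 []).length)

def count_non_zero_columns_alt (matrix : List (List Int)) : Int :=
  if matrix.isEmpty then 0
  else if !is_matrix_rectangular_alt matrix then -1
  else
    let num_cols : Int := (PySem.List.pyGetD matrix 0 []).length
    let zero_cols : PySem.Set Int := matrix.foldl
      (fun s row => (PySem.List.enumerate row 0).foldl
        (fun s p => if p.2 == 0 then PySem.Set.add s p.1 else s) s)
      PySem.Set.empty
    num_cols - zero_cols.length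

-- ===== PRECONDITION & SPEC =====
def Spec_count_non_zero_columns (matrix : List (List Int)) (out : Int) : Prop := out = count_non_zero_columns_alt matrix
instance (matrix : List (List Int)) (out : Int) : Decidable (Spec_count_non_zero_columns matrix out) := by unfold Spec_count_non_zero_columns; infer_instance

-- ===== CLAIM (what is proved, stated in full; the proofs are below) =====
def Claim_equal_count_non_zero_columns : Prop := ∀ (matrix : List (List Int)), Dom_count_non_zero_columns matrix → Spec_count_non_zero_columns matrix (count_non_zero_columns matrix)

-- ===== LEMMAS AND PROOFS =====

-- 'column c contains a zero', row-wise
def hz (matrix : List (List Int)) (c : Int) : Bool :=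
  matrix.any (fun row => PySem.List.pyGetD row c 1 == 0)

theorem colScanA_eq_any (matrix : List (List Int)) (col : Int) (idxs : List Int) :
    colScanA matrix col idxs
      = idxs.any (fun r => PySem.List.pyGetD (PySem.List.pyGetD matrix r []) col 1 == 0) := by
  induction idxs with
  | nil => rfl
  | cons r rs ih => by_cases h : PySem.List.pyGetD (PySem.List.pyGetD matrix r []) col 1 == 0 <;>
      simp [colScanA, h, ih]

theorem colScanA_range (matrix : List (List Int)) (col : Int) :
    colScanA matrix col (PySem.List.pyRange 0 (matrix.length : Int) 1) = hz matrix col := by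
  rw [colScanA_eq_any, hz]
  have := PySem.List.map_pyGetD_pyRange_zero' matrix ([] : List Int)
  calc (PySem.List.pyRange 0 (matrix.length : Int) 1).any
          (fun r => PySem.List.pyGetD (PySem.List.pyGetD matrix r []) col 1 == 0)
      = ((PySem.List.pyRange 0 (matrix.length : Int) 1).map
          (fun r => PySem.List.pyGetD matrix r [])).any
          (fun row => PySem.List.pyGetD row col 1 == 0) := by
        rw [List.any_map]; rfl
    _ = matrix.any (fun row => PySem.List.pyGetD row col 1 == 0) := by rw [this]

-- the inner fold of B over one row's enumerate
def innerFold (s : PySem.Set Int) (ps : List (Int × Int)) : PySem.Set Int :=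
  ps.foldl (fun s p => if p.2 == 0 then PySem.Set.add s p.1 else s) s

theorem mem_innerFold (y : Int) (ps : List (Int × Int)) (s : PySem.Set Int) :
    y ∈ innerFold s ps ↔ y ∈ s ∨ ∃ p ∈ ps, p.2 = 0 ∧ y = p.1 := by
  induction ps generalizing s with
  | nil => simp [innerFold]
  | cons p ps ih =>
    rw [innerFold, List.foldl_cons]
    by_cases h : p.2 = 0
    · rw [if_pos (by simp [h]), show (List.foldl (fun s p => if p.2 == 0 then PySem.Set.add s p.1 else s) (PySem.Set.add s p.1) ps) = innerFold (PySem.Set.add s p.1) ps from rfl, ih]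
      simp only [PySem.Set.mem_add, List.mem_cons]
      constructor
      · rintro (⟨hs | hy⟩ | ⟨q, hq, hq0, hy⟩)
        · exact Or.inl hs
        · exact Or.inr ⟨p, Or.inl rfl, h, hy⟩
        · exact Or.inr ⟨q, Or.inr hq, hq0, hy⟩
      · rintro (hs | ⟨q, (rfl | hq), hq0, hy⟩)
        · exact Or.inl (Or.inl hs)
        · exact Or.inl (Or.inr hy)
        · exact Or.inr ⟨q, hq, hq0, hy⟩
    · rw [if_neg (by simp [h]), show (List.foldl (fun s p => if p.2 == 0 then PySem.Set.add s p.1 else s) s ps) = innerFold s ps from rfl, ih]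
      simp only [List.mem_cons]
      constructor
      · rintro (hs | ⟨q, hq, hq0, hy⟩)
        · exact Or.inl hs
        · exact Or.inr ⟨q, Or.inr hq, hq0, hy⟩
      · rintro (hs | ⟨q, (rfl | hq), hq0, hy⟩)
        · exact Or.inl hs
        · exact absurd hq0 h
        · exact Or.inr ⟨q, hq, hq0, hy⟩

theorem nodup_innerFold (ps : List (Int × Int)) (s : PySem.Set Int) (hs : s.Nodup) :
    (innerFold s ps).Nodup := by
  induction ps generalizing s with
  | nil => exact hs
  | cons p ps ih =>
    by_cases h : p.2 = 0 <;> simp [innerFold, List.foldl_cons, h] at *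
    · exact ih _ (PySem.Set.nodup_add s p.1 hs)
    · exact ih _ hs

-- the outer fold of B
def zset (matrix : List (List Int)) : PySem.Set Int :=
  matrix.foldl (fun s row => innerFold s (PySem.List.enumerate row 0)) PySem.Set.empty

theorem mem_enumerate (row : List Int) (p : Int × Int) (st : Int) :
    p ∈ PySem.List.enumerate row st ↔
      ∃ i : Nat, i < row.length ∧ p = ((st + i : Int), row.getD i 0) := by
  induction row generalizing st with
  | nil => simp [PySem.List.enumerate_nil]
  | cons x xs ih =>
    rw [PySem.List.enumerate_cons]
    simp only [List.mem_cons, ih]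
    constructor
    · rintro (rfl | ⟨i, hi, rfl⟩)
      · exact ⟨0, by simp, by simp⟩
      · refine ⟨i + 1, by simpa using hi, ?_⟩
        simp [Prod.ext_iff]
        omega
    · rintro ⟨i, hi, rfl⟩
      cases i with
      | zero => exact Or.inl (by simp)
      | succ i =>
        refine Or.inr ⟨i, by simpa using hi, ?_⟩
        simp [Prod.ext_iff]
        omega

theorem mem_zset_aux (matrix : List (List Int)) (y : Int) (s : PySem.Set Int) :
    y ∈ matrix.foldl (fun s row => innerFold s (PySem.List.enumerate row 0)) s ↔
      y ∈ s ∨ ∃ row ∈ matrix, ∃ p ∈ PySem.List.enumerate row 0, p.2 = 0 ∧ y = p.1 := by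
  induction matrix generalizing s with
  | nil => simp
  | cons r rs ih =>
    simp only [List.foldl_cons, ih, mem_innerFold]
    constructor
    · rintro (⟨hs | ⟨p, hp, h0, hy⟩⟩ | ⟨row, hrow, hp⟩)
      · exact Or.inl hs
      · exact Or.inr ⟨r, by simp, p, hp, h0, hy⟩
      · exact Or.inr ⟨row, List.mem_cons_of_mem _ hrow, hp⟩
    · rintro (hs | ⟨row, hrow, hp⟩)
      · exact Or.inl (Or.inl hs)
      · rcases List.mem_cons.mp hrow with rfl | hrow
        · exact Or.inl (Or.inr hp)
        · exact Or.inr ⟨row, hrow, hp⟩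

theorem nodup_zset (matrix : List (List Int)) : (zset matrix).Nodup := by
  have H : ∀ (m : List (List Int)) (s : PySem.Set Int), s.Nodup →
      (m.foldl (fun s row => innerFold s (PySem.List.enumerate row 0)) s).Nodup := by
    intro m
    induction m with
    | nil => intro s hs; exact hs
    | cons r rs ih => intro s hs; exact ih _ (nodup_innerFold _ s hs)
  exact H matrix PySem.Set.empty (by simp [PySem.Set.empty])

-- membership in B's set, under rectangularity
theorem mem_zset (matrix : List (List Int)) (n : Nat)
    (hrect : ∀ row ∈ matrix, row.length = n) (y : Int) :
    y ∈ zset matrix ↔ (0 ≤ y ∧ y < (n : Int) ∧ hz matrix y = true) := by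
  rw [zset, mem_zset_aux]
  simp only [PySem.Set.empty, List.not_mem_nil, false_or]
  constructor
  · rintro ⟨row, hrow, p, hp, h0, rfl⟩
    rcases (mem_enumerate row p 0).mp hp with ⟨i, hi, rfl⟩
    have hlen := hrect row hrow
    refine ⟨by simp, by simp; omega, ?_⟩
    simp only [hz, List.any_eq_true]
    refine ⟨row, hrow, ?_⟩
    have : PySem.List.pyGetD row ((0 : Int) + i) 1 = row.getD i 1 := by
      simp
    rw [this]
    simp only [beq_iff_eq]
    rw [List.getD_eq_getElem _ _ hi] at h0 ⊢
    exact h0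
  · rintro ⟨hy0, hyn, hzy⟩
    simp only [hz, List.any_eq_true, beq_iff_eq] at hzy
    rcases hzy with ⟨row, hrow, h0⟩
    have hlen := hrect row hrow
    refine ⟨row, hrow, ((0 : Int) + y.toNat, row.getD y.toNat 0), ?_, ?_, by simp; omega⟩
    · exact (mem_enumerate row _ 0).mpr ⟨y.toNat, by omega, by simp⟩
    · have : PySem.List.pyGetD row ((y.toNat : Nat) : Int) 1 = row.getD y.toNat 1 := by
        simpa using PySem.List.pyGetD_natCast row y.toNat 1
      rw [show y = ((y.toNat : Nat) : Int) by omega, this] at h0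
      have hi : y.toNat < row.length := by omega
      simp only []
      rw [List.getD_eq_getElem _ _ hi] at h0 ⊢
      exact h0

theorem length_zset (matrix : List (List Int)) (n : Nat)
    (hrect : ∀ row ∈ matrix, row.length = n) :
    (zset matrix).length = ((PySem.List.pyRange 0 (n : Int) 1).filter (hz matrix)).length := by
  have hperm : (zset matrix).Perm ((PySem.List.pyRange 0 (n : Int) 1).filter (hz matrix)) := by
    rw [List.perm_ext_iff_of_nodup (nodup_zset matrix)
      ((PySem.List.nodup_pyRange_one 0 (n : Int)).filter _)]
    intro y
    rw [mem_zset matrix n hrect y]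
    simp [List.mem_filter, PySem.List.mem_pyRange_one]
    tauto
  exact hperm.length_eq

theorem foldl_count (l : List Int) (p : Int → Bool) (init : Int) :
    l.foldl (fun acc c => if !(p c) then acc + 1 else acc) init
      = init + (l.countP (fun c => !(p c)) : Int) := by
  induction l generalizing init with
  | nil => simp
  | cons c cs ih =>
    rw [List.foldl_cons]
    by_cases h : p c
    · rw [if_neg (by simp [h]), ih, List.countP_cons, if_neg (by simp [h])]
      simp
    · rw [if_pos (by simp [h]), ih, List.countP_cons, if_pos (by simp [h])]
      push_cast
      omega

theorem countP_split (l : List Int) (p : Int → Bool) :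
    l.countP (fun c => !(p c)) + l.countP p = l.length := by
  induction l with
  | nil => simp
  | cons c cs ih => by_cases h : p c <;> simp [h] <;> omega

theorem rect_iff (matrix : List (List Int)) :
    is_matrix_rectangular matrix = true ↔
      ∀ row ∈ matrix, row.length = (PySem.List.pyGetD matrix 0 []).length := by
  simp [is_matrix_rectangular, List.all_eq_true]

-- ===== VERDICT (by name: the statement is the Claim_ definition above) =====
theorem count_non_zero_columns_spec : Claim_equal_count_non_zero_columns := by
  intro matrix _
  unfold Spec_count_non_zero_columns count_non_zero_columns count_non_zero_columns_alt
  by_cases hemp : matrix.isEmpty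
  · simp [hemp]
  · by_cases hrect : is_matrix_rectangular matrix
    · have hrect' : is_matrix_rectangular_alt matrix = true := hrect
      simp only [hemp, hrect, hrect', Bool.not_true, Bool.false_eq_true, if_false,
        Bool.not_eq_true']
      set n : Nat := (PySem.List.pyGetD matrix 0 []).length with hn
      have hR : ∀ row ∈ matrix, row.length = n := (rect_iff matrix).mp hrect
      have he : ∀ (acc col : Int),
          (if colScanA matrix col (PySem.List.pyRange 0 (matrix.length : Int) 1) = false
            then acc + 1 else acc)
          = (if !(hz matrix col) then acc + 1 else acc) := by
        intro acc col
        rw [colScanA_range]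
        by_cases h : hz matrix col <;> simp [h]
      have hcols : (PySem.List.pyRange 0 (n : Int) 1).foldl
          (fun acc col =>
            if colScanA matrix col (PySem.List.pyRange 0 (matrix.length : Int) 1) = false
            then acc + 1 else acc) 0
          = ((PySem.List.pyRange 0 (n : Int) 1).countP (fun c => !(hz matrix c)) : Int) := by
        rw [List.foldl_ext _ _ 0 (fun acc col _ => he acc col)]
        simpa using foldl_count (PySem.List.pyRange 0 (n : Int) 1) (hz matrix) 0
      show _ = (n : Int) - _
      rw [hcols]
      have hlz : ((zset matrix : List Int)).length
          = ((PySem.List.pyRange 0 (n : Int) 1).filter (hz matrix)).length :=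
        length_zset matrix n hR
      rw [show (matrix.foldl (fun s row =>
            (PySem.List.enumerate row 0).foldl
              (fun s p => if p.2 == 0 then PySem.Set.add s p.1 else s) s) PySem.Set.empty)
          = zset matrix from rfl, hlz]
      have hsplit := countP_split (PySem.List.pyRange 0 (n : Int) 1) (hz matrix)
      have hlen : (PySem.List.pyRange 0 (n : Int) 1).length = n := by
        rw [PySem.List.length_pyRange_one]; omega
      rw [hlen] at hsplit
      rw [← List.countP_eq_length_filter]
      omega
    · have hrect2 : is_matrix_rectangular matrix = false := Bool.eq_false_iff.mpr hrect
      have hrect' : is_matrix_rectangular_alt matrix = false := hrect2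
      simp [hemp, hrect2, hrect']
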